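-- pv_equiv track=rewrite | github.com/MrBrantCode/unitest_baseline | mut_generate/mist_train_cf/cf_37677/solution.py | count_A_before_D
-- ===== SOURCE A (Python) =====
-- def count_A_before_D(S):
--     cnt_a = 0
--     ans = 0
--     for i in range(len(S)):
--         if S[i] == 'A':
--             cnt_a += 1
--         elif S[i] == 'D':
--             ans += cnt_a
--         else:
--             cnt_a = 0
--     return ans
-- ===== SOURCE B (Python) =====
-- def count_A_before_D(S):
--     # Two-stage structural method: cut S into maximal segments of 'A'/'D'
--     # characters, then split each segment at its 'D's; each run of A's of
--     # length L followed by m of the segment's D's contributes L * m.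
--     segments = []
--     cur = []
--     for c in S:
--         if c == 'A' or c == 'D':
--             cur.append(c)
--         else:
--             if cur:
--                 segments.append(''.join(cur))
--             cur = []
--     if cur:
--         segments.append(''.join(cur))
--     ans = 0
--     for seg in segments:
--         parts = seg.split('D')          # runs of A's separated by the D's
--         k = len(parts) - 1              # number of D's in this segment
--         ans += sum(len(p) * (k - t) for t, p in enumerate(parts[:-1]))
--     return ans
-- ===== Notes on version B (the rewrite author's own statement) =====
-- stated objective: alternative
-- what changed: B replaces A's single character-by-character counter scan with a structural decomposition: it cuts the string into maximal 'A'/'D' segments, splits each segment at its 'D's, and sums len(run) * (number of D's after the run) over the A-runs, instead of maintaining a running A-counter and answer accumulator.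
import Mathlib
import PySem

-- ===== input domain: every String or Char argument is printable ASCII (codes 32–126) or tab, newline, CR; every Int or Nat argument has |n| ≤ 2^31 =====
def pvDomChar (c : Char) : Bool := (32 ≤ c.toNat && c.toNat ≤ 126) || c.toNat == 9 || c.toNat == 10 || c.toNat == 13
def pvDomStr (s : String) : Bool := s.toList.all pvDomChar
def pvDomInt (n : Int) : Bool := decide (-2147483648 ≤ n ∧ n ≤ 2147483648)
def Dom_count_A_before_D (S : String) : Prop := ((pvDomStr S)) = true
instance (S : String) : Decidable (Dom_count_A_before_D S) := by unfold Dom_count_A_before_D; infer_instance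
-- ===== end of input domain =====

-- B replaces A's single counter scan by a structural decomposition (maximal A/D
-- segments, split at 'D', sum of run-length × D's-after); same O(n), objective: alternative.

-- ===== PORT A =====
-- A's loop state: (cnt_a, ans); iterates left to right over the characters.
def countAStep (st : Int × Int) (c : Char) : Int × Int :=
  if c = 'A' then (st.1 + 1, st.2)
  else if c = 'D' then (st.1, st.2 + st.1)
  else (0, st.2)

def count_A_before_D (S : String) : Int :=
  (S.toList.foldl countAStep (0, 0)).2

-- ===== PORT B =====
-- hand port of Python's str.split with a single-character separator; exact:
-- same recursion as CPython's semantics (list of pieces between occurrences,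
-- empty pieces kept, result never empty).
def splitD : List Char → List (List Char)
  | [] => [[]]
  | c :: l => if c = 'D' then [] :: splitD l else (splitD l).modifyHead (c :: ·)

-- one segment's contribution: sum(len(p) * (k - t) for t, p in enumerate(parts[:-1]))
def segPairs (seg : List Char) : Int :=
  let parts := splitD seg
  let k : Int := (parts.length : Int) - 1
  ((parts.dropLast.zipIdx).map (fun pt => (pt.1.length : Int) * (k - (pt.2 : Int)))).sum

-- stage-1 loop body: extend the current A/D segment or close it off.
def segStep (st : List (List Char) × List Char) (c : Char) : List (List Char) × List Char :=
  if c = 'A' ∨ c = 'D' then (st.1, st.2 ++ [c])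
  else if st.2 ≠ [] then (st.1 ++ [st.2], ([] : List Char)) else (st.1, ([] : List Char))

def count_A_before_D_alt (S : String) : Int :=
  let st := S.toList.foldl segStep ([], [])
  let segments := if st.2 ≠ [] then st.1 ++ [st.2] else st.1
  segments.foldl (fun a seg => a + segPairs seg) 0

-- ===== PRECONDITION & SPEC =====
def Spec_count_A_before_D (S : String) (out : Int) : Prop := out = count_A_before_D_alt S
instance (S : String) (out : Int) : Decidable (Spec_count_A_before_D S out) := by unfold Spec_count_A_before_D; infer_instance

-- ===== CLAIM (what is proved, stated in full; the proofs are below) =====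
def Claim_equal_count_A_before_D : Prop := ∀ (S : String), Dom_count_A_before_D S → Spec_count_A_before_D S (count_A_before_D S)

-- ===== LEMMAS AND PROOFS =====

-- reference value: pairs contributed when the current open segment is `cur`
-- and the rest of the input is the second argument.
def Phi : List Char → List Char → Int
  | cur, [] => segPairs cur
  | cur, c :: l => if c = 'A' ∨ c = 'D' then Phi (cur ++ [c]) l else segPairs cur + Phi [] l

-- appending a character to the last piece of a split.
def appLast : List (List Char) → Char → List (List Char)
  | [], _ => []
  | [p], x => [p ++ [x]]
  | p :: q :: ps, x => p :: appLast (q :: ps) x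

-- weighted length sum: v K [p0,…] = len p0 * K + len p1 * (K-1) + …
def vW : Int → List (List Char) → Int
  | _, [] => 0
  | K, p :: ps => (p.length : Int) * K + vW (K - 1) ps

def sumLen (ps : List (List Char)) : Int := (ps.map (fun p => (p.length : Int))).sum

def sumPairs (ss : List (List Char)) : Int := ss.foldl (fun a seg => a + segPairs seg) 0

theorem splitD_ne_nil (l : List Char) : splitD l ≠ [] := by
  induction l with
  | nil => simp [splitD]
  | cons c l ih =>
    simp only [splitD]
    split
    · simp
    · cases h : splitD l with
      | nil => exact absurd h ih
      | cons q qs => simp [List.modifyHead]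

theorem appLast_ne_nil (ps : List (List Char)) (x : Char) (h : ps ≠ []) : appLast ps x ≠ [] := by
  match ps with
  | [] => exact absurd rfl h
  | [p] => simp [appLast]
  | p :: q :: ps => simp [appLast]

theorem appLast_length (ps : List (List Char)) (x : Char) : (appLast ps x).length = ps.length := by
  induction ps with
  | nil => rfl
  | cons p ps ih =>
    cases ps with
    | nil => rfl
    | cons q qs => simp only [appLast, List.length_cons] at ih ⊢; omega

theorem appLast_dropLast (ps : List (List Char)) (x : Char) : (appLast ps x).dropLast = ps.dropLast := by
  induction ps with
  | nil => rfl
  | cons p ps ih =>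
    cases ps with
    | nil => rfl
    | cons q qs =>
      have hne : appLast (q :: qs) x ≠ [] := appLast_ne_nil _ _ (by simp)
      simp only [appLast]
      rw [List.dropLast_cons_of_ne_nil hne, List.dropLast_cons_of_ne_nil (by simp), ih]

theorem splitD_append_ne (l : List Char) (x : Char) (hx : x ≠ 'D') :
    splitD (l ++ [x]) = appLast (splitD l) x := by
  induction l with
  | nil => simp [splitD, hx, appLast, List.modifyHead]
  | cons c l ih =>
    simp only [List.cons_append, splitD]
    split
    · rw [ih]
      cases h : splitD l with
      | nil => exact absurd h (splitD_ne_nil l)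
      | cons q qs => simp [appLast]
    · rw [ih]
      cases h : splitD l with
      | nil => exact absurd h (splitD_ne_nil l)
      | cons q qs =>
        cases qs with
        | nil => simp [appLast, List.modifyHead]
        | cons r rs => simp [appLast, List.modifyHead]

theorem splitD_append_D (l : List Char) : splitD (l ++ ['D']) = splitD l ++ [[]] := by
  induction l with
  | nil => simp [splitD]
  | cons c l ih =>
    simp only [List.cons_append, splitD]
    split
    · rw [ih]; simp
    · rw [ih]
      cases h : splitD l with
      | nil => exact absurd h (splitD_ne_nil l)
      | cons q qs => simp [List.modifyHead]

theorem zipIdx_sum (ps : List (List Char)) : ∀ (n : Nat) (K : Int),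
    ((ps.zipIdx n).map (fun pt => (pt.1.length : Int) * (K - (pt.2 : Int)))).sum
      = vW (K - n) ps := by
  induction ps with
  | nil => intro n K; simp [vW]
  | cons p ps ih =>
    intro n K
    simp only [List.zipIdx_cons, List.map_cons, List.sum_cons, vW, ih]
    have h1 : K - (n + 1 : Nat) = K - (n : Int) - 1 := by push_cast; ring
    rw [h1]

theorem segPairs_eq_vW (seg : List Char) :
    segPairs seg = vW ((splitD seg).length - 1) (splitD seg).dropLast := by
  unfold segPairs
  simp only []
  rw [zipIdx_sum]
  norm_num

theorem vW_succ (ps : List (List Char)) : ∀ K : Int, vW K ps = vW (K - 1) ps + sumLen ps := by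
  induction ps with
  | nil => intro K; simp [vW, sumLen]
  | cons p ps ih =>
    intro K
    simp only [vW, sumLen, List.map_cons, List.sum_cons]
    rw [ih (K - 1)]
    unfold sumLen
    ring

theorem vW_append_single (qs : List (List Char)) : ∀ (q : List Char) (K : Int),
    vW K (qs ++ [q]) = vW K qs + (q.length : Int) * (K - qs.length) := by
  induction qs with
  | nil => intro q K; simp [vW]
  | cons r qs ih =>
    intro q K
    simp only [List.cons_append, vW, ih, List.length_cons]
    push_cast
    ring

theorem segPairs_nil : segPairs [] = 0 := by decide

theorem segPairs_append_ne (l : List Char) (x : Char) (hx : x ≠ 'D') :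
    segPairs (l ++ [x]) = segPairs l := by
  rw [segPairs_eq_vW, segPairs_eq_vW, splitD_append_ne l x hx,
      appLast_length, appLast_dropLast]

theorem vW_pred_dropLast (ps : List (List Char)) (h : ps ≠ []) :
    vW ((ps.length : Int) - 1) ps = vW ((ps.length : Int) - 1) ps.dropLast := by
  obtain ⟨qs, q, rfl⟩ : ∃ qs q, ps = qs ++ [q] :=
    ⟨ps.dropLast, ps.getLast h, (List.dropLast_append_getLast h).symm⟩
  have hc : (((qs ++ [q]).length : Int)) - 1 = (qs.length : Int) := by simp
  rw [hc, vW_append_single, List.dropLast_concat]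
  simp

theorem segPairs_append_D (l : List Char) :
    segPairs (l ++ ['D']) = segPairs l + sumLen (splitD l) := by
  rw [segPairs_eq_vW, segPairs_eq_vW, splitD_append_D, List.dropLast_concat]
  have hne := splitD_ne_nil l
  have hcast : (((splitD l) ++ [[]]).length : Int) - 1 = ((splitD l).length : Int) := by simp
  rw [hcast, vW_succ (splitD l) (((splitD l).length : Int)), vW_pred_dropLast _ hne]

theorem sumLen_splitD (l : List Char) :
    sumLen (splitD l) = ((l.countP (fun c => !(c == 'D'))) : Int) := by
  induction l with
  | nil => simp [splitD, sumLen]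
  | cons c l ih =>
    simp only [splitD]
    split
    · rename_i h
      subst h
      have h1 : sumLen ([] :: splitD l) = sumLen (splitD l) := by simp [sumLen]
      rw [h1, ih, List.countP_cons]
      simp
    · rename_i h
      cases hs : splitD l with
      | nil => exact absurd hs (splitD_ne_nil l)
      | cons q qs =>
        rw [hs] at ih
        simp only [List.modifyHead]
        have h1 : sumLen ((c :: q) :: qs) = sumLen (q :: qs) + 1 := by
          simp [sumLen]; ring
        have h2 : (c == 'D') = false := by simp [h]
        rw [h1, ih, List.countP_cons, h2]
        simp

theorem countP_eq_count_A (cur : List Char) (h : ∀ c ∈ cur, c = 'A' ∨ c = 'D') :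
    (cur.countP (fun c => !(c == 'D'))) = cur.count 'A' := by
  rw [List.count_eq_countP]
  apply List.countP_congr
  intro c hc
  rcases h c hc with h1 | h1 <;> subst h1 <;> simp

theorem foldlA (l : List Char) : ∀ (cur : List Char) (s : Int),
    (∀ c ∈ cur, c = 'A' ∨ c = 'D') →
    (l.foldl countAStep ((cur.count 'A' : Int), s)).2 = s - segPairs cur + Phi cur l := by
  induction l with
  | nil => intro cur s _; simp [Phi]
  | cons c l ih =>
    intro cur s hpure
    by_cases hA : c = 'A'
    · subst hA
      have hstep : countAStep ((cur.count 'A' : Int), s) 'A' = ((cur.count 'A' : Int) + 1, s) := by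
        simp [countAStep]
      rw [List.foldl_cons, hstep]
      have hpure' : ∀ d ∈ cur ++ ['A'], d = 'A' ∨ d = 'D' := by
        intro d hd
        rcases List.mem_append.mp hd with h1 | h1
        · exact hpure d h1
        · simp at h1; subst h1; exact Or.inl rfl
      have hcnt : ((cur.count 'A' : Int)) + 1 = ((cur ++ ['A']).count 'A' : Int) := by
        simp [List.count_append]
      rw [hcnt, ih (cur ++ ['A']) s hpure']
      rw [segPairs_append_ne cur 'A' (by decide)]
      simp [Phi]
    · by_cases hD : c = 'D'
      · subst hD
        have hstep : countAStep ((cur.count 'A' : Int), s) 'D'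
            = ((cur.count 'A' : Int), s + (cur.count 'A' : Int)) := by
          simp [countAStep]
        rw [List.foldl_cons, hstep]
        have hpure' : ∀ d ∈ cur ++ ['D'], d = 'A' ∨ d = 'D' := by
          intro d hd
          rcases List.mem_append.mp hd with h1 | h1
          · exact hpure d h1
          · simp at h1; subst h1; exact Or.inr rfl
        have ihD := ih (cur ++ ['D']) (s + (cur.count 'A' : Int)) hpure'
        rw [show ((cur ++ ['D']).count 'A') = cur.count 'A' from by simp [List.count_append]] at ihD
        rw [ihD]
        rw [segPairs_append_D, sumLen_splitD, countP_eq_count_A cur hpure]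
        have hPhi : Phi cur ('D' :: l) = Phi (cur ++ ['D']) l := by simp [Phi]
        rw [hPhi]
        ring
      · have hstep : countAStep ((cur.count 'A' : Int), s) c = (0, s) := by
          simp [countAStep, hA, hD]
        rw [List.foldl_cons, hstep]
        have h0 : (0 : Int) = (([] : List Char).count 'A' : Int) := by simp
        rw [h0, ih [] s (by intro d hd; cases hd)]
        have hPhi : Phi cur (c :: l) = segPairs cur + Phi [] l := by
          simp [Phi, hA, hD]
        rw [hPhi, segPairs_nil]
        ring

theorem sumPairs_append_single (ss : List (List Char)) (t : List Char) :
    sumPairs (ss ++ [t]) = sumPairs ss + segPairs t := by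
  unfold sumPairs
  simp [List.foldl_append]

theorem foldlB (l : List Char) : ∀ (segs : List (List Char)) (cur : List Char),
    sumPairs (if (l.foldl segStep (segs, cur)).2 ≠ [] then
                (l.foldl segStep (segs, cur)).1 ++ [(l.foldl segStep (segs, cur)).2]
              else (l.foldl segStep (segs, cur)).1)
      = sumPairs segs + Phi cur l := by
  induction l with
  | nil =>
    intro segs cur
    simp only [List.foldl_nil, Phi]
    by_cases h : cur = []
    · subst h; simp [segPairs_nil]
    · rw [if_pos h, sumPairs_append_single]
  | cons c l ih =>
    intro segs cur
    by_cases h : c = 'A' ∨ c = 'D'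
    · have hstep : segStep (segs, cur) c = (segs, cur ++ [c]) := by simp [segStep, h]
      rw [List.foldl_cons, hstep, ih segs (cur ++ [c])]
      have hPhi : Phi cur (c :: l) = Phi (cur ++ [c]) l := by simp [Phi, h]
      rw [hPhi]
    · by_cases hc : cur = []
      · subst hc
        have hstep : segStep (segs, ([] : List Char)) c = (segs, []) := by simp [segStep, h]
        rw [List.foldl_cons, hstep, ih segs []]
        have hPhi : Phi [] (c :: l) = segPairs [] + Phi [] l := by simp [Phi, h]
        rw [hPhi, segPairs_nil]
        ring
      · have hstep : segStep (segs, cur) c = (segs ++ [cur], []) := by simp [segStep, h, hc]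
        rw [List.foldl_cons, hstep, ih (segs ++ [cur]) [], sumPairs_append_single]
        have hPhi : Phi cur (c :: l) = segPairs cur + Phi [] l := by simp [Phi, h]
        rw [hPhi]
        ring

-- ===== VERDICT (by name: the statement is the Claim_ definition above) =====
theorem count_A_before_D_spec : Claim_equal_count_A_before_D := by
  intro S _
  unfold Spec_count_A_before_D count_A_before_D count_A_before_D_alt
  have hA := foldlA S.toList [] 0 (by intro c hc; cases hc)
  have hB := foldlB S.toList [] []
  simp only [List.count_nil, Nat.cast_zero] at hA
  unfold sumPairs at hB
  rw [hA, hB]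
  simp [segPairs_nil]
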